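-- pv_equiv track=rewrite | github.com/cshaver88/IntroToComputerScience1-cs110 | stringPack.py | lastOccurMostFreqChar
-- ===== SOURCE A (Python) =====
-- def numOccur(s, c):
--     """
--     >>> numOccur('mississippi', 'i')
--     4
--     >>> numOccur('puppy', 'p')
--     3
--     >>> numOccur('shoes', 's')
--     2
--     >>> numOccur('banana', 'b')
--     1
--     >>> numOccur('silly', 'z')
--     0
--     """
--     count = 0
--     for elem in s:
--         if elem == c:
--             count += 1
--     return count
--
-- def lastOccur(s, c):
--     """
--     >>> lastOccur('hello', 'h')
--     0
--     >>> lastOccur('mississippi', 'i')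
--     10
--     >>> lastOccur('banana', 'n')
--     4
--     >>> lastOccur('erudite', 'z')
--     -1
--     >>> lastOccur('puppy', 'u')
--     1
--     """
--     index = 0
--     lastoccur = -1
--     for elem in s:
--         if elem == c:
--             lastoccur = index
--         index += 1
--     return lastoccur
--
-- def lastOccurMostFreqChar(s):
--     """
--     >>> lastOccurMostFreqChar('')
--     -1
--     >>> lastOccurMostFreqChar('hello')
--     3
--     >>> lastOccurMostFreqChar('banana')
--     5
--     >>> lastOccurMostFreqChar('erudite')
--     6
--     >>> lastOccurMostFreqChar('puppy')
--     3
--     """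
--     mostfreq = -1
--     mostchar = ''
--     for elem in s:
--         freq = numOccur(s, elem)
--         if freq > mostfreq:
--             mostfreq = freq
--             mostchar = elem
--     return lastOccur(s, mostchar)
-- ===== SOURCE B (Python) =====
-- def lastOccurMostFreqChar(s):
--     positions = {}
--     for i, ch in enumerate(s):
--         positions.setdefault(ch, []).append(i)
--     best = None
--     for ch, ps in positions.items():
--         if best is None or len(ps) > len(best):
--             best = ps
--     return -1 if best is None else best[-1]
-- ===== Notes on version B (the rewrite author's own statement) =====
-- stated objective: faster
-- what changed: One pass builds a dict mapping each character to the list of its indices; the winner (strict '>' over dict insertion order reproduces A's first-by-position tie-break) yields its last stored index directly, replacing A's per-character full rescans and the final lastOccur rescan.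
import Mathlib
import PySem

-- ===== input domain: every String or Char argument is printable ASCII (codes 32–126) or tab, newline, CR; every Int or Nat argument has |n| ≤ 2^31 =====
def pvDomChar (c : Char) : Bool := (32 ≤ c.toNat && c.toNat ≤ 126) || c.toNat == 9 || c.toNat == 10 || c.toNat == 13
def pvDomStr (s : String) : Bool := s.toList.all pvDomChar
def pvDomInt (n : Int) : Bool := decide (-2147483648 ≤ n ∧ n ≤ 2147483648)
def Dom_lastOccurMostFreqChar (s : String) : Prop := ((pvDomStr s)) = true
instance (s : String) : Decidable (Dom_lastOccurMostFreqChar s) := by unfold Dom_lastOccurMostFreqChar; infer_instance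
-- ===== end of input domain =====

-- B replaces A's quadratic per-character rescans by a single pass that groups indices
-- per character in a dict and reads the answer off the winner's position list (faster).


-- ===== PORT A =====
def pyNumOccur (s : String) (c : Char) : Int :=
  s.toList.foldl (fun count elem => if elem = c then count + 1 else count) 0

-- Python's mostchar starts as '' (matches no character): modelled as Option Char, none = ''.
def pyLastOccur (s : String) (c : Option Char) : Int :=
  (s.toList.foldl (fun (st : Int × Int) elem =>
      (st.1 + 1, if some elem = c then st.1 else st.2)) (0, -1)).2

def lastOccurMostFreqChar (s : String) : Int :=
  let st := s.toList.foldl (fun (st : Int × Option Char) elem =>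
      let freq := pyNumOccur s elem
      if freq > st.1 then (freq, some elem) else st) ((-1 : Int), (none : Option Char))
  pyLastOccur s st.2

-- ===== PORT B =====
def lastOccurMostFreqChar_alt (s : String) : Int :=
  let positions := (PySem.List.enumerate s.toList).foldl
      (fun (d : PySem.Dict Char (List Int)) p => d.modify p.2 [] (fun ps => ps ++ [p.1]))
      PySem.Dict.empty
  let best := positions.items.foldl
      (fun (b : Option (List Int)) q =>
        match b with
        | none => some q.2
        | some ps => if PySem.List.len q.2 > PySem.List.len ps then some q.2 else b) none
  match best with
  | none => -1
  | some ps =>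
      match PySem.List.pyGet? ps (-1) with
      | some v => v
      | none => -1   -- IndexError guard; every stored position list is nonempty

-- ===== PRECONDITION & SPEC =====
def Spec_lastOccurMostFreqChar (s : String) (out : Int) : Prop := out = lastOccurMostFreqChar_alt s
instance (s : String) (out : Int) : Decidable (Spec_lastOccurMostFreqChar s out) := by unfold Spec_lastOccurMostFreqChar; infer_instance

-- ===== CLAIM (what is proved, stated in full; the proofs are below) =====
def Claim_equal_lastOccurMostFreqChar : Prop := ∀ (s : String), Dom_lastOccurMostFreqChar s → Spec_lastOccurMostFreqChar s (lastOccurMostFreqChar s)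

-- ===== LEMMAS AND PROOFS =====

-- count of c in t, as an Int (the score A maximises)
def pvCnt (t : List Char) (c : Char) : Int := (t.count c : Int)

-- the list of indices (starting at i) at which c occurs in t — what B's dict stores
def pvPos (t : List Char) (c : Char) (i : Int) : List Int :=
  ((PySem.List.enumerate t i).filter (fun p => p.2 == c)).map (fun p => p.1)

-- A's selection step and B's selection step, named for the lemmas
def pvStepA (t : List Char) (st : Int × Option Char) (c : Char) : Int × Option Char :=
  if pvCnt t c > st.1 then (pvCnt t c, some c) else st

def pvStepB (b : Option (List Int)) (q : Char × List Int) : Option (List Int) :=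
  match b with
  | none => some q.2
  | some ps => if PySem.List.len q.2 > PySem.List.len ps then some q.2 else b

-- the relation the two selection folds maintain
def pvRel (t : List Char) (st : Int × Option Char) (b : Option (List Int)) : Prop :=
  (st = (-1, none) ∧ b = none) ∨
  ∃ c, c ∈ t ∧ st = (pvCnt t c, some c) ∧ b = some (pvPos t c 0)

lemma pv_cnt_foldl (t : List Char) (c : Char) :
    ∀ a : Int, t.foldl (fun a e => if e = c then a + 1 else a) a = a + pvCnt t c := by
  induction t with
  | nil => intro a; simp [pvCnt]
  | cons e t ih =>
      intro a
      by_cases h : e = c <;>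
        simp [List.foldl_cons, h, ih, pvCnt]; omega

lemma pv_numOccur_eq (s : String) (c : Char) : pyNumOccur s c = pvCnt s.toList c := by
  simpa using pv_cnt_foldl s.toList c 0

lemma pv_pos_cons (e : Char) (t : List Char) (c : Char) (i : Int) :
    pvPos (e :: t) c i = if e == c then i :: pvPos t c (i + 1) else pvPos t c (i + 1) := by
  by_cases h : e == c <;> simp [pvPos, PySem.List.enumerate_cons, h]

lemma pv_length_pos (t : List Char) (c : Char) :
    ∀ i : Int, (pvPos t c i).length = t.count c := by
  induction t with
  | nil => intro i; simp [pvPos]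
  | cons e t ih =>
      intro i
      rw [pv_pos_cons]
      by_cases h : e = c <;> simp [h, ih]

lemma pv_getLast_getD_cons (l : List Int) (i a : Int) :
    (i :: l).getLast?.getD a = l.getLast?.getD i := by
  cases l with
  | nil => rfl
  | cons x xs =>
      have hx : ∃ y, (x :: xs).getLast? = some y := by
        cases h : (x :: xs).getLast? with
        | none => simp at h
        | some y => exact ⟨y, rfl⟩
      obtain ⟨y, hy⟩ := hx
      rw [List.getLast?_cons_cons, hy]
      rfl

lemma pv_last_fold (t : List Char) (c : Char) :
    ∀ (i a : Int),
      (t.foldl (fun (st : Int × Int) elem =>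
          (st.1 + 1, if some elem = some c then st.1 else st.2)) (i, a)).2
        = (pvPos t c i).getLast?.getD a := by
  induction t with
  | nil => intro i a; simp [pvPos]
  | cons e t ih =>
      intro i a
      rw [List.foldl_cons, pv_pos_cons]
      by_cases h : e = c
      · have h1 : (if some e = some c then i else a) = i := by simp [h]
        have h2 : (e == c) = true := by simp [h]
        rw [h1, h2, if_pos rfl, ih, pv_getLast_getD_cons]
      · have h1 : (if some e = some c then i else a) = a := by simp [h]
        have h2 : (e == c) = false := by simp [h]
        rw [h1, h2]
        simp only [Bool.false_eq_true, if_false]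
        exact ih (i + 1) a

lemma pv_lastOccur_some (s : String) (c : Char) :
    pyLastOccur s (some c) = (pvPos s.toList c 0).getLast?.getD (-1) := by
  unfold pyLastOccur
  exact pv_last_fold s.toList c 0 (-1)

lemma pv_lastOccur_none (s : String) : pyLastOccur s none = -1 := by
  unfold pyLastOccur
  have h : ∀ (t : List Char) (i a : Int),
      (t.foldl (fun (st : Int × Int) elem =>
          (st.1 + 1, if some elem = (none : Option Char) then st.1 else st.2)) (i, a)).2 = a := by
    intro t
    induction t with
    | nil => intro i a; rfl
    | cons e t ih =>
        intro i a
        rw [List.foldl_cons]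
        have h1 : (if some e = (none : Option Char) then i else a) = a := by simp
        rw [h1]
        exact ih (i + 1) a
  exact h s.toList 0 (-1)

lemma pv_stepA_fst_le (t : List Char) (st : Int × Option Char) (c : Char) :
    st.1 ≤ (pvStepA t st c).1 := by
  unfold pvStepA; split_ifs with h
  · exact le_of_lt h
  · exact le_refl _

lemma pv_cnt_le_stepA (t : List Char) (st : Int × Option Char) (c : Char) :
    pvCnt t c ≤ (pvStepA t st c).1 := by
  unfold pvStepA; split_ifs with h
  · exact le_refl _
  · exact not_lt.mp h

-- skipping duplicates whose score is already dominated does not change the fold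
lemma pv_skip (t : List Char) (c : Char) :
    ∀ (l : List Char) (st : Int × Option Char), pvCnt t c ≤ st.1 →
      (l.filter (fun y => y != c)).foldl (pvStepA t) st = l.foldl (pvStepA t) st := by
  intro l
  induction l with
  | nil => intro st _; rfl
  | cons x l ih =>
      intro st h
      by_cases hx : x = c
      · have : (x != c) = false := by simp [hx]
        rw [List.filter_cons, this]
        have hst : pvStepA t st x = st := by
          unfold pvStepA; rw [if_neg]; rw [hx]; exact not_lt.mpr h
        simp only [Bool.false_eq_true, if_false, List.foldl_cons, hst]
        exact ih st h
      · have : (x != c) = true := by simp [hx]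
        rw [List.filter_cons, this]
        simp only [if_true, List.foldl_cons]
        exact ih (pvStepA t st x) (le_trans h (pv_stepA_fst_le t st x))

-- A's fold over the full string equals the same fold over the distinct characters
lemma pv_dedup_fold (t : List Char) :
    ∀ (l : List Char) (st : Int × Option Char),
      l.foldl (pvStepA t) st = (PySem.Set.ofList l).foldl (pvStepA t) st := by
  intro l
  induction l with
  | nil => intro st; rfl
  | cons c l ih =>
      intro st
      rw [PySem.Set.ofList_cons]
      have hd : PySem.Set.discard (PySem.Set.ofList l) c
          = (PySem.Set.ofList l).filter (fun y => y != c) := rfl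
      rw [List.foldl_cons, List.foldl_cons, hd, ih (pvStepA t st c),
        pv_skip t c (PySem.Set.ofList l) (pvStepA t st c) (pv_cnt_le_stepA t st c)]

lemma pv_cnt_nonneg (t : List Char) (c : Char) : (0 : Int) ≤ pvCnt t c := by
  unfold pvCnt
  exact Int.natCast_nonneg _

lemma pv_len_pos_eq (t : List Char) (c : Char) :
    PySem.List.len (pvPos t c 0) = pvCnt t c := by
  show ((pvPos t c 0).length : Int) = pvCnt t c
  rw [pv_length_pos t c 0]; rfl

-- the two selection folds stay related
lemma pv_rel_fold (t : List Char) :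
    ∀ (K : List Char) (st : Int × Option Char) (b : Option (List Int)),
      (∀ c ∈ K, c ∈ t) → pvRel t st b →
      pvRel t (K.foldl (pvStepA t) st)
        (K.foldl (fun b c => pvStepB b (c, pvPos t c 0)) b) := by
  intro K
  induction K with
  | nil => intro st b _ h; exact h
  | cons c K ih =>
      intro st b hK hrel
      have hc : c ∈ t := hK c (List.mem_cons_self ..)
      have hK' : ∀ x ∈ K, x ∈ t := fun x hx => hK x (List.mem_cons_of_mem _ hx)
      rw [List.foldl_cons, List.foldl_cons]
      refine ih (pvStepA t st c) _ hK' ?_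
      rcases hrel with ⟨hst, hb⟩ | ⟨c', hc', hst, hb⟩
      · have hA : pvStepA t st c = (pvCnt t c, some c) := by
          unfold pvStepA
          rw [hst, if_pos]
          exact lt_of_lt_of_le (by norm_num) (pv_cnt_nonneg t c)
        rw [hb, hA]
        exact Or.inr ⟨c, hc, rfl, rfl⟩
      · rw [hb, hst]
        show pvRel t (pvStepA t (pvCnt t c', some c') c)
          (pvStepB (some (pvPos t c' 0)) (c, pvPos t c 0))
        unfold pvStepA pvStepB
        simp only [pv_len_pos_eq]
        by_cases h : pvCnt t c > pvCnt t c'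
        · rw [if_pos h, if_pos h]
          exact Or.inr ⟨c, hc, rfl, rfl⟩
        · rw [if_neg h, if_neg h]
          exact Or.inr ⟨c', hc', rfl, rfl⟩

lemma pv_pyGet_neg_one (l : List Int) : PySem.List.pyGet? l (-1) = l.getLast? := by
  cases l with
  | nil => rfl
  | cons x xs =>
      have hidx : PySem.List.pyIdx? (xs.length + 1) (-1) = some xs.length := by
        simp only [PySem.List.pyIdx?]
        rw [if_neg (by norm_num), if_pos (by push_cast; omega)]
        norm_num
      simp [PySem.List.pyGet?, hidx, List.getLast?_eq_getElem?]

-- B's dict has exactly the distinct characters as keys, each mapped to its index list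
lemma pv_items_positions (t : List Char) :
    ((PySem.List.enumerate t).foldl
        (fun (d : PySem.Dict Char (List Int)) p => d.modify p.2 [] (fun ps => ps ++ [p.1]))
        PySem.Dict.empty).items
      = (PySem.Set.ofList t).map (fun c => (c, pvPos t c 0)) := by
  set d := (PySem.List.enumerate t).foldl
      (fun (d : PySem.Dict Char (List Int)) p => d.modify p.2 [] (fun ps => ps ++ [p.1]))
      PySem.Dict.empty with hd
  have hkeys : d.keys = PySem.Set.ofList t := by
    rw [hd, PySem.Dict.keys_foldl_modify_key (PySem.List.enumerate t) (fun p => p.2) []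
      (fun _ p ps => ps ++ [p.1]) PySem.Dict.empty]
    simp [PySem.List.map_snd_enumerate, PySem.Set.update_nil_left, PySem.Dict.keys_empty]
  have hnd : d.keys.Nodup := by
    rw [hkeys]; exact PySem.Set.nodup_ofList t
  have hget : ∀ c : Char, d.getD c [] = pvPos t c 0 := by
    intro c
    have hswap : d = ((PySem.List.enumerate t).map (fun p => (p.2, p.1))).foldl
        (fun (d : PySem.Dict Char (List Int)) p => d.modify p.1 [] (fun ps => ps ++ [p.2]))
        PySem.Dict.empty := by
      rw [hd, List.foldl_map]
    rw [hswap, PySem.Dict.getD_foldl_modify_append]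
    simp only [PySem.Dict.getD_empty, List.nil_append, List.filter_map, List.map_map, pvPos]
    rfl
  rw [PySem.Dict.items_eq_map_keys d hnd []]
  rw [hkeys]
  exact List.map_congr_left (fun c _ => by rw [hget c])

lemma pv_pos_ne_nil_of_mem (t : List Char) (c : Char) (hc : c ∈ t) :
    pvPos t c 0 ≠ [] := by
  intro h
  have hl := pv_length_pos t c 0
  rw [h] at hl
  have h0 : t.count c = 0 := by simpa using hl.symm
  exact absurd (List.count_pos_iff.mpr hc) (by omega)

-- ===== VERDICT (by name: the statement is the Claim_ definition above) =====
theorem lastOccurMostFreqChar_spec : Claim_equal_lastOccurMostFreqChar := by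
  intro s _
  show lastOccurMostFreqChar s = lastOccurMostFreqChar_alt s
  unfold lastOccurMostFreqChar lastOccurMostFreqChar_alt
  simp only [pv_numOccur_eq]
  have hA : (fun (st : Int × Option Char) elem =>
      let freq := pvCnt s.toList elem
      if freq > st.1 then (freq, some elem) else st) = pvStepA s.toList := rfl
  rw [hA]
  have hB : (fun (b : Option (List Int)) (q : Char × List Int) =>
      match b with
      | none => some q.2
      | some ps => if PySem.List.len q.2 > PySem.List.len ps then some q.2 else b) = pvStepB := rfl
  rw [pv_items_positions s.toList, hB, List.foldl_map]
  rw [pv_dedup_fold s.toList s.toList ((-1 : Int), (none : Option Char))]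
  have hrel := pv_rel_fold s.toList (PySem.Set.ofList s.toList)
    ((-1 : Int), (none : Option Char)) none
    (fun c hc => by simpa [PySem.Set.mem_ofList] using hc)
    (Or.inl ⟨rfl, rfl⟩)
  rcases hrel with ⟨hst, hb⟩ | ⟨c, hc, hst, hb⟩
  · rw [hst, hb, pv_lastOccur_none]
  · rw [hst, hb, pv_lastOccur_some]
    have hne := pv_pos_ne_nil_of_mem s.toList c hc
    obtain ⟨v, hv⟩ : ∃ v, (pvPos s.toList c 0).getLast? = some v := by
      cases h : (pvPos s.toList c 0).getLast? with
      | none => exact absurd (List.getLast?_eq_none_iff.mp h) hne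
      | some v => exact ⟨v, rfl⟩
    show (pvPos s.toList c 0).getLast?.getD (-1)
      = match PySem.List.pyGet? (pvPos s.toList c 0) (-1) with
        | some w => w
        | none => -1
    rw [pv_pyGet_neg_one, hv]
    rfl
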